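-- pv_equiv track=rewrite | github.com/mt4110/maakie-brainlab | scripts/ops/s28_provider_canary_recovery.py | trailing_nonpass_streak
-- ===== SOURCE A (Python) =====
-- from typing import Any, Dict, List
--
-- def trailing_nonpass_streak(runs: List[Dict[str, Any]]) -> int:
--     streak = 0
--     for row in reversed(runs):
--         st = str(row.get("status") or "").upper()
--         if st in {"PASS"}:
--             break
--         streak += 1
--     return streak
-- ===== SOURCE B (Python) =====
-- def trailing_nonpass_streak(runs):
--     last_pass = -1
--     for i, row in enumerate(runs):
--         st = str(row.get("status") or "").upper()
--         if st == "PASS":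
--             last_pass = i
--     return len(runs) - last_pass - 1
-- ===== Notes on version B (the rewrite author's own statement) =====
-- stated objective: alternative
-- what changed: Replaces the reversed scan with early break by a single forward pass that records the index of the last PASS row and returns len(runs) - last_pass - 1.
import Mathlib
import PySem

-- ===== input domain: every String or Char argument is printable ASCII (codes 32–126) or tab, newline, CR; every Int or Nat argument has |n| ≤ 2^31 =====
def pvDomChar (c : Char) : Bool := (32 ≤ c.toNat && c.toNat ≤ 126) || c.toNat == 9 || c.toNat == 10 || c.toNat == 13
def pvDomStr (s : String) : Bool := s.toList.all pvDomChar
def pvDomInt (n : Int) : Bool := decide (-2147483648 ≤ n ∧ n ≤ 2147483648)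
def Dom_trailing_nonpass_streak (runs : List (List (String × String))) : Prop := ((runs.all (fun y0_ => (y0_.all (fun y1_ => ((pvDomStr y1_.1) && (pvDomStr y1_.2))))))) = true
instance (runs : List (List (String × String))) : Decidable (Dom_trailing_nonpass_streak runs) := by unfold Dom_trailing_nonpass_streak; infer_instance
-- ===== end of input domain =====

-- B replaces A's reversed scan with an early break by one forward pass recording the last PASS index (alternative decomposition; return value only).
-- ===== PORT A =====
-- st = str(row.get("status") or "").upper(); values are strings, so str() is identity and `or ""` maps the missing key / "" to "".
def pvStatus (row : List (String × String)) : String :=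
  PySem.Str.upper (PySem.Dict.getD ⟨row⟩ "status" "")

-- the `for row in reversed(runs)` loop with `break`: structural recursion over the reversed list
def pvALoop : List (List (String × String)) → Int
  | [] => 0
  | row :: rest => if pvStatus row == "PASS" then 0 else pvALoop rest + 1

def trailing_nonpass_streak (runs : List (List (String × String))) : Int :=
  pvALoop runs.reverse

-- ===== PORT B =====
def trailing_nonpass_streak_alt (runs : List (List (String × String))) : Int :=
  let last_pass : Int :=
    (PySem.List.enumerate runs).foldl
      (fun lp p => if pvStatus p.2 == "PASS" then p.1 else lp) (-1)
  (runs.length : Int) - last_pass - 1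

-- ===== PRECONDITION & SPEC =====
def Spec_trailing_nonpass_streak (runs : List (List (String × String))) (out : Int) : Prop := out = trailing_nonpass_streak_alt runs
instance (runs : List (List (String × String))) (out : Int) : Decidable (Spec_trailing_nonpass_streak runs out) := by unfold Spec_trailing_nonpass_streak; infer_instance

-- ===== CLAIM (what is proved, stated in full; the proofs are below) =====
def Claim_equal_trailing_nonpass_streak : Prop := ∀ (runs : List (List (String × String))), Dom_trailing_nonpass_streak runs → Spec_trailing_nonpass_streak runs (trailing_nonpass_streak runs)

-- ===== LEMMAS AND PROOFS =====

-- ===== VERDICT (by name: the statement is the Claim_ definition above) =====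
def pvLastPass (runs : List (List (String × String))) : Int :=
  (PySem.List.enumerate runs).foldl
    (fun lp p => if pvStatus p.2 == "PASS" then p.1 else lp) (-1)

theorem pvLastPass_append (l : List (List (String × String))) (r : List (String × String)) :
    pvLastPass (l ++ [r]) =
      if pvStatus r == "PASS" then (l.length : Int) else pvLastPass l := by
  simp [pvLastPass, PySem.List.enumerate_append, List.foldl_append, PySem.List.enumerate]

theorem pvALoop_eq (l : List (List (String × String))) :
    pvALoop l.reverse = (l.length : Int) - pvLastPass l - 1 := by
  induction l using List.reverseRecOn with
  | nil => simp [pvALoop, pvLastPass, PySem.List.enumerate]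
  | append_singleton l r ih =>
    rw [List.reverse_append, pvLastPass_append]
    by_cases h : pvStatus r == "PASS" <;> simp [pvALoop, h, ih]
    omega

theorem trailing_nonpass_streak_spec : Claim_equal_trailing_nonpass_streak := by
  intro runs _
  unfold Spec_trailing_nonpass_streak trailing_nonpass_streak trailing_nonpass_streak_alt
  rw [pvALoop_eq]
  rfl
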